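-- pv_equiv track=rewrite | github.com/Bshortall/CS320-2023-Sum1-shortall | assigns/04/MySolution/Python/assign04_05.py | wordle_guess
-- ===== SOURCE A (Python) =====
-- def generate_words(result, not_in_word, misplaced, index=0):
--         if index == len(result):
--             yield "".join(result)
--             return
--
--         if result[index] == '*':
--             for c in 'abcdefghijklmnopqrstuvwxyz':
--                 if c not in not_in_word and misplaced.get(c, -1) != index:
--                     result[index] = c
--                     yield from generate_words(result, not_in_word, misplaced, index+1)
--                     result[index] = '*'  # Reset the character after generating the words
--         else:
--             yield from generate_words(result, not_in_word, misplaced, index+1)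
--
-- def wordle_guess(hints):
--     # Array containing the result
--     result = [ '*' for i in range(len(hints[0])) ]
--
--     # Set containing letters we know are not in the word
--     not_in_word = set()
--
--     # Dictionary containing misplaced letters and their positions
--     misplaced = {}
--
--     # Process all hints
--     for hint in hints:
--         for i, word in enumerate(hint):
--             if word[0] == 1:
--                 result[i] = word[1]
--             elif word[0] == 0:
--                 not_in_word.add(word[1])
--             else:
--                 misplaced[word[1]] = i
--
--     return next(generate_words(result, not_in_word, misplaced))
-- ===== SOURCE B (Python) =====
-- def wordle_guess(hints):
--     # Same hint-processing preamble as A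
--     result = [ '*' for i in range(len(hints[0])) ]
--     not_in_word = set()
--     misplaced = {}
--     for hint in hints:
--         for i, word in enumerate(hint):
--             if word[0] == 1:
--                 result[i] = word[1]
--             elif word[0] == 0:
--                 not_in_word.add(word[1])
--             else:
--                 misplaced[word[1]] = i
--
--     # Positions are independent, so no backtracking generator is needed:
--     # one forward pass picks the smallest admissible letter per wildcard.
--     out = []
--     for i, s in enumerate(result):
--         if s != '*':
--             out.append(s)
--             continue
--         for c in 'abcdefghijklmnopqrstuvwxyz':
--             if c not in not_in_word and misplaced.get(c, -1) != i:
--                 out.append(c)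
--                 break
--         else:
--             raise StopIteration()
--     return "".join(out)
-- ===== Notes on version B (the rewrite author's own statement) =====
-- stated objective: simpler
-- what changed: The recursive backtracking generator plus next() is replaced by a single forward loop over positions that picks the smallest admissible letter per wildcard (positions are independent, so no recursion or backtracking is needed); the hint-processing preamble is kept.
-- outside the precondition, e.g. on wordle_guess([]): A raises IndexError, B raises IndexError
import Mathlib
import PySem

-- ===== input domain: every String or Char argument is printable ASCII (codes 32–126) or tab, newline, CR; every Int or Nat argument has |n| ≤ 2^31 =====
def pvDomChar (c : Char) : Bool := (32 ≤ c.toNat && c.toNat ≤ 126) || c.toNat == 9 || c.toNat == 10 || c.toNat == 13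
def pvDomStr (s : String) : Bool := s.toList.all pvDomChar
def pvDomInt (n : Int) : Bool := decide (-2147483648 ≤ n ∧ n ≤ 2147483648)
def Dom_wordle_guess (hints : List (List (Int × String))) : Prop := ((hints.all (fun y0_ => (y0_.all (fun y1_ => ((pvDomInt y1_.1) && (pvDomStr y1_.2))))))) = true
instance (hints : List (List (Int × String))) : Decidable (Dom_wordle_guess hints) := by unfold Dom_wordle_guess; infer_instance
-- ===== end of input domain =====

-- B replaces A's backtracking generator + next() by one forward pass that picks the
-- smallest admissible letter per wildcard position (positions are independent): simpler.

-- shared preamble of BOTH Pythons (both run the identical hint-processing loop):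
-- result list, not_in_word set, misplaced dict
def pvProcess (hints : List (List (Int × String))) :
    List String × PySem.Set String × PySem.Dict String Int :=
  hints.foldl
    (fun st hint =>
      (PySem.List.enumerate hint 0).foldl
        (fun st iw =>
          if iw.2.1 = 1 then
            (PySem.List.pySetD st.1 iw.1 iw.2.2, st.2.1, st.2.2)
          else if iw.2.1 = 0 then
            (st.1, PySem.Set.add st.2.1 iw.2.2, st.2.2)
          else
            (st.1, st.2.1, PySem.Dict.insert st.2.2 iw.2.2 iw.1))
        st)
    (List.replicate (hints.headD []).length "*", PySem.Set.empty, PySem.Dict.empty)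

-- 'abcdefghijklmnopqrstuvwxyz' iterated character by character (each a 1-char string)
def pvAlpha : List String :=
  ["a","b","c","d","e","f","g","h","i","j","k","l","m",
   "n","o","p","q","r","s","t","u","v","w","x","y","z"]

-- the shared letter test: c not in not_in_word and misplaced.get(c, -1) != i
def pvOk (notIn : PySem.Set String) (mis : PySem.Dict String Int) (c : String) (i : Int) : Bool :=
  !(PySem.Set.contains notIn c) && !(PySem.Dict.getD mis c (-1) == i)

-- ===== PORT A =====
-- generate_words as a lazy first-yield: none = exhausted generator (next() raises StopIteration)
def pvGen (notIn : PySem.Set String) (mis : PySem.Dict String Int)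
    (index : Int) : List String → Option (List String)
  | [] => some []
  | s :: rest =>
    if s = "*" then
      pvAlpha.findSome? (fun c =>
        if pvOk notIn mis c index then
          (pvGen notIn mis (index + 1) rest).map (fun ws => c :: ws)
        else none)
    else
      (pvGen notIn mis (index + 1) rest).map (fun ws => s :: ws)

def wordle_guess (hints : List (List (Int × String))) : String :=
  let st := pvProcess hints
  ((pvGen st.2.1 st.2.2 0 st.1).map (PySem.Str.join "")).getD ""

-- ===== PORT B =====
-- one forward pass over enumerate(result); none = the for/else raised StopIteration
def wordle_guess_alt (hints : List (List (Int × String))) : String :=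
  let st := pvProcess hints
  let out :=
    (PySem.List.enumerate st.1 0).foldl
      (fun acc p =>
        acc.bind (fun l =>
          if p.2 ≠ "*" then some (l ++ [p.2])
          else (pvAlpha.find? (fun c => pvOk st.2.1 st.2.2 c p.1)).map (fun c => l ++ [c])))
      (some [])
  (out.map (PySem.Str.join "")).getD ""

-- ===== PRECONDITION & SPEC =====
-- helpers for the precondition (declarative, over the raw input only)
-- all hint entries in processing order, with their in-hint positions
def pvEntries (hints : List (List (Int × String))) : List (Int × Int × String) :=
  (hints.map (fun h => PySem.List.enumerate h 0)).flatten

-- the final value of result[i] after the preamble ("*" if never fixed)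
def pvFinal (hints : List (List (Int × String))) (i : Int) : String :=
  ((((pvEntries hints).filter (fun e => e.1 = i ∧ e.2.1 = 1)).getLast?).map (·.2.2)).getD "*"

-- letter c (a 1-char string) is admissible at position i
def pvOkSpec (hints : List (List (Int × String))) (c : String) (i : Int) : Bool :=
  ((pvEntries hints).all (fun e => !(e.2.1 == 0) || !(e.2.2 == c))) &&
  !(((((pvEntries hints).filter (fun e => !(e.2.1 == 0) && !(e.2.1 == 1) && (e.2.2 == c))).getLast?).map (·.1)) == some i)

-- Pre_ excludes exactly the inputs where A raises: hints == [] (IndexError on hints[0]),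
-- a flag-1 entry whose position is out of range of result (IndexError), and a wildcard
-- position admitting no letter a..z (next() raises StopIteration).
def Pre_wordle_guess (hints : List (List (Int × String))) : Prop :=
  hints ≠ [] ∧
  (∀ e ∈ pvEntries hints, e.2.1 = 1 → 0 ≤ e.1 ∧ e.1 < ((hints.headD []).length : Int)) ∧
  (∀ i : Nat, i < (hints.headD []).length → pvFinal hints (i : Int) = "*" →
    ∃ c ∈ pvAlpha, pvOkSpec hints c (i : Int) = true)
instance (hints : List (List (Int × String))) : Decidable (Pre_wordle_guess hints) := by
  unfold Pre_wordle_guess; infer_instance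

def pvWitness_wordle_guess : (List (List (Int × String))) := [[(1, "c"), (0, "b")]]

def Spec_wordle_guess (hints : List (List (Int × String))) (out : String) : Prop := out = wordle_guess_alt hints
instance (hints : List (List (Int × String))) (out : String) : Decidable (Spec_wordle_guess hints out) := by unfold Spec_wordle_guess; infer_instance

-- ===== CLAIM (what is proved, stated in full; the proofs are below) =====
def Claim_equal_wordle_guess : Prop := ∀ (hints : List (List (Int × String))), Dom_wordle_guess hints → Pre_wordle_guess hints → Spec_wordle_guess hints (wordle_guess hints)

-- ===== LEMMAS AND PROOFS =====

-- findSome? over a guard whose recursive payload does not depend on the letter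
theorem pv_findSome?_guard {α β : Type} (l : List α) (p : α → Bool) (r : Option (List β))
    (g : α → List β → List β) :
    l.findSome? (fun c => if p c then r.map (g c) else none)
      = r.bind (fun ws => (l.find? p).map (fun c => g c ws)) := by
  cases r with
  | none =>
    induction l with
    | nil => simp
    | cons x xs ih => by_cases h : p x <;> simp_all
  | some v =>
    induction l with
    | nil => simp
    | cons x xs ih =>
      by_cases h : p x <;> simp_all

-- a fold whose step binds the accumulator dies once the accumulator is none
theorem pv_foldl_none {α β : Type} (f : α → β → Option β) (l : List α) :
    l.foldl (fun acc p => acc.bind (f p)) none = none := by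
  induction l with
  | nil => rfl
  | cons x xs ih => simpa using ih

-- B's fold from any prefix computes A's generator result, prefixed
theorem pv_fold_eq_gen (notIn : PySem.Set String) (mis : PySem.Dict String Int) :
    ∀ (rest : List String) (i : Int) (acc : List String),
    (PySem.List.enumerate rest i).foldl
      (fun acc p =>
        acc.bind (fun l' =>
          if p.2 ≠ "*" then some (l' ++ [p.2])
          else (pvAlpha.find? (fun c => pvOk notIn mis c p.1)).map (fun c => l' ++ [c])))
      (some acc)
    = (pvGen notIn mis i rest).map (fun ws => acc ++ ws) := by
  intro rest
  induction rest with
  | nil => intro i acc; simp [PySem.List.enumerate_nil, pvGen]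
  | cons s rest ih =>
    intro i acc
    rw [PySem.List.enumerate_cons, List.foldl_cons]
    by_cases hs : s = "*"
    · simp only [hs, pvGen, Option.bind_some, ne_eq, not_true_eq_false, if_false]
      rw [pv_findSome?_guard]
      cases hfind : pvAlpha.find? (fun c => pvOk notIn mis c i) with
      | none =>
        cases hg : pvGen notIn mis (i + 1) rest <;>
          simpa [hg] using pv_foldl_none _ (PySem.List.enumerate rest (i + 1))
      | some c =>
        simp only [Option.map_some]
        rw [ih (i + 1) (acc ++ [c])]
        cases hg : pvGen notIn mis (i + 1) rest <;> simp
    · simp only [pvGen, Option.bind_some, ne_eq, hs, not_false_eq_true, if_true]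
      rw [ih (i + 1) (acc ++ [s])]
      cases hg : pvGen notIn mis (i + 1) rest <;> simp

-- pv_ports_eq with both sides written out (the ports' bodies after zeta-reduction)
theorem pv_ports_eq_explicit (hints : List (List (Int × String))) :
    ((pvGen (pvProcess hints).2.1 (pvProcess hints).2.2 0 (pvProcess hints).1).map
        (PySem.Str.join "")).getD ""
    = (((PySem.List.enumerate (pvProcess hints).1 0).foldl
          (fun acc p =>
            acc.bind (fun l =>
              if p.2 ≠ "*" then some (l ++ [p.2])
              else ((pvAlpha.find? (fun c => pvOk (pvProcess hints).2.1 (pvProcess hints).2.2 c p.1)).map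
                (fun c => l ++ [c]))))
          (some [])).map (PySem.Str.join "")).getD "" := by
  rw [pv_fold_eq_gen]
  cases hg : pvGen (pvProcess hints).2.1 (pvProcess hints).2.2 0 (pvProcess hints).1 <;>
    simp

-- the two ports agree on every input (Pre_ is only needed for faithfulness to Python)
theorem pv_ports_eq (hints : List (List (Int × String))) :
    wordle_guess hints = wordle_guess_alt hints := by
  exact pv_ports_eq_explicit hints

-- ===== VERDICT (by name: the statement is the Claim_ definition above) =====
theorem wordle_guess_spec : Claim_equal_wordle_guess := by
  intro hints _ _
  unfold Spec_wordle_guess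
  exact pv_ports_eq hints
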